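-- pv_equiv track=rewrite | github.com/Shahriar-Sazid/typo-generator | rules.py | skip_letter
-- ===== SOURCE A (Python) =====
-- from itertools import combinations, permutations, product
--
-- def remove_ith_char(s: str, idx):
--     return s[:idx] + s[idx + 1:]
--
-- def skip_letter(s: str, n=1):
--     length = len(s)
--
--     miss_combinations = list(combinations([i for i in range(length)], n))
--
--     typos = []
--     for combination in miss_combinations:
--         typo = s
--         for i in range(len(combination) - 1, -1, -1):
--             typo = remove_ith_char(typo, combination[i])
--         typos.append(typo)
--
--     return typos
-- ===== SOURCE B (Python) =====
-- from itertools import combinations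
--
-- def skip_letter(s: str, n=1):
--     # Choose the indices to KEEP instead of the indices to delete; reverse
--     # lexicographic order over keep-sets equals lexicographic order over delete-sets.
--     if n < 0:
--         raise ValueError("n must be non-negative")
--     length = len(s)
--     keep = length - n
--     if keep < 0:   # more deletions than characters: no index sets of that size
--         return []
--     return [''.join(s[i] for i in kept)
--             for kept in reversed(list(combinations(range(length), keep)))]
-- ===== Notes on version B (the rewrite author's own statement) =====
-- stated objective: simpler
-- what changed: B enumerates the index sets to KEEP (combinations of length len(s)-n, traversed in reverse) and builds each result directly by joining the surviving characters, instead of A's enumeration of deletion sets with a per-combination right-to-left deletion loop over string slices.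
import Mathlib
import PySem

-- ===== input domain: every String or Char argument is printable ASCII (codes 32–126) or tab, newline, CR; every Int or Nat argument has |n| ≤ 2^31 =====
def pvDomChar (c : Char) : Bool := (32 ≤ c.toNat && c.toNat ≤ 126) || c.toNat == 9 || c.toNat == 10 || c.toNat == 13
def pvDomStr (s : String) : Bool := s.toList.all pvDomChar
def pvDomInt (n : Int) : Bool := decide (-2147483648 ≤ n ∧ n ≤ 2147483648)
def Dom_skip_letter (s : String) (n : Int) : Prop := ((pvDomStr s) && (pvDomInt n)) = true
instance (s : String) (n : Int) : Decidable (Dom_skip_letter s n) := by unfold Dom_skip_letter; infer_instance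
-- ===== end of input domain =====

-- B chooses the indices to KEEP (reverse-lexicographic) and joins the surviving
-- characters, instead of A's deletion sets with a right-to-left deletion loop.

-- itertools.combinations(xs, k): all length-k subsequences in lexicographic order
-- (shared helper: both Pythons call the same library function)
def combs {α : Type} : Nat → List α → List (List α)
  | 0, _ => [[]]
  | _ + 1, [] => []
  | k + 1, x :: xs => ((combs k xs).map (fun c => x :: c)) ++ combs (k + 1) xs

-- ===== PORT A =====
def remove_ith_char (s : String) (idx : Int) : String :=
  PySem.Str.slice s none (some idx) ++ PySem.Str.slice s (some (idx + 1)) none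

def skip_letter (s : String) (n : Int) : List String :=
  let length : Int := PySem.Str.len s
  -- combinations([i for i in range(length)], n); Pre_ gives 0 ≤ n, so n.toNat is exact
  let missCombinations := combs n.toNat (PySem.List.pyRange 0 length)
  missCombinations.map (fun combination =>
    (PySem.List.pyRange ((combination.length : Int) - 1) (-1) (-1)).foldl
      (fun typo i => remove_ith_char typo (PySem.List.pyGetD combination i 0)) s)

-- ===== PORT B =====
def skip_letter_alt (s : String) (n : Int) : List String :=
  if n < 0 then []  -- Python raises ValueError here; outside Pre_skip_letter
  else
    let length : Int := PySem.Str.len s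
    let keep : Int := length - n
    if keep < 0 then []
    else
      ((combs keep.toNat (PySem.List.pyRange 0 length)).reverse).map
        (fun kept =>
          -- ''.join(s[i] for i in kept); every i ∈ kept is a valid index, the default is never used
          String.ofList (kept.map (fun i => (PySem.Str.pyGet? s i).getD ' ')))

-- ===== PRECONDITION & SPEC =====
-- Pre_ excludes exactly n < 0, where both Pythons raise ValueError
-- (itertools.combinations rejects a negative r in A; B validates n explicitly).
def Pre_skip_letter (s : String) (n : Int) : Prop := 0 ≤ n
instance (s : String) (n : Int) : Decidable (Pre_skip_letter s n) := by unfold Pre_skip_letter; infer_instance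
def pvWitness_skip_letter : String × Int := ("ab", 1)

def Spec_skip_letter (s : String) (n : Int) (out : List String) : Prop := out = skip_letter_alt s n
instance (s : String) (n : Int) (out : List String) : Decidable (Spec_skip_letter s n out) := by unfold Spec_skip_letter; infer_instance

-- ===== CLAIM (what is proved, stated in full; the proofs are below) =====
def Claim_equal_skip_letter : Prop := ∀ (s : String) (n : Int), Dom_skip_letter s n → Pre_skip_letter s n → Spec_skip_letter s n (skip_letter s n)


-- ===== LEMMAS AND PROOFS =====

lemma combs_map {α β : Type} (f : α → β) (k : Nat) (l : List α) :
    combs k (l.map f) = (combs k l).map (List.map f) := by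
  induction l generalizing k with
  | nil => cases k <;> simp [combs]
  | cons x xs ih =>
    cases k with
    | zero => simp [combs]
    | succ k => simp [combs, ih]

lemma combs_sublist {α : Type} {k : Nat} {l c : List α} (h : c ∈ combs k l) : c.Sublist l := by
  induction l generalizing k c with
  | nil => cases k <;> simp [combs] at h <;> simp [h]
  | cons x xs ih =>
    cases k with
    | zero => simp [combs] at h; simp [h]
    | succ k =>
      simp [combs] at h
      rcases h with ⟨c', hc', rfl⟩ | h
      · exact (ih hc').cons₂ x
      · exact (ih h).cons x

lemma combs_nil_of_lt {α : Type} {k : Nat} {l : List α} (h : l.length < k) : combs k l = [] := by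
  induction l generalizing k with
  | nil => cases k with
    | zero => simp at h
    | succ k => simp [combs]
  | cons x xs ih =>
    cases k with
    | zero => simp at h
    | succ k =>
      simp at h
      rw [combs, ih (show xs.length < k by omega), ih (show xs.length < k + 1 by omega)]
      simp

lemma combs_full {α : Type} (l : List α) : combs l.length l = [l] := by
  induction l with
  | nil => simp [combs]
  | cons x xs ih =>
    simp [combs, ih, combs_nil_of_lt (by omega : xs.length < xs.length + 1)]

-- the complements of the k-combinations, in order, are the (|l|-k)-combinations reversed
lemma combs_compl_reverse {α : Type} [DecidableEq α] (l : List α) (hnd : l.Nodup) :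
    ∀ (j k : Nat), j + k = l.length →
      (combs k l).map (fun c => l.filter (fun a => a ∉ c)) = (combs j l).reverse := by
  induction l with
  | nil =>
    intro j k h
    simp only [List.length_nil] at h
    obtain ⟨rfl, rfl⟩ : j = 0 ∧ k = 0 := by omega
    simp [combs]
  | cons x xs ih =>
    intro j k hjk
    simp only [List.length_cons] at hjk
    rcases List.nodup_cons.mp hnd with ⟨hx, hnd'⟩
    cases k with
    | zero =>
      have hj : j = (x :: xs).length := by simp; omega
      subst hj
      rw [combs_full]
      simp [combs]
    | succ k =>
      simp only [combs, List.map_append, List.map_map]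
      have e1 : List.map ((fun c => List.filter (fun a => decide (a ∉ c)) (x :: xs)) ∘ fun c => x :: c) (combs k xs)
          = List.map (fun c => List.filter (fun a => decide (a ∉ c)) xs) (combs k xs) := by
        apply List.map_congr_left
        intro c hc
        simp only [Function.comp, List.filter_cons]
        have : (decide (x ∉ x :: c)) = false := by simp
        rw [this]
        apply List.filter_congr
        intro a ha
        have hax : a ≠ x := fun h => hx (h ▸ ha)
        simp [hax]
      have e2 : List.map (fun c => List.filter (fun a => decide (a ∉ c)) (x :: xs)) (combs (k+1) xs)
          = List.map (fun c => x :: List.filter (fun a => decide (a ∉ c)) xs) (combs (k+1) xs) := by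
        apply List.map_congr_left
        intro c hc
        have hxc : x ∉ c := fun h => hx ((combs_sublist hc).subset h)
        simp [hxc]
      rw [e1, e2]
      have e3 : List.map (fun c => x :: List.filter (fun a => decide (a ∉ c)) xs) (combs (k+1) xs)
          = List.map (fun c => x :: c) (List.map (fun c => List.filter (fun a => decide (a ∉ c)) xs) (combs (k+1) xs)) := by
        simp [List.map_map]
      rw [e3]
      cases j with
      | zero =>
        have hk : k = xs.length := by omega
        subst hk
        rw [combs_nil_of_lt (show xs.length < xs.length + 1 by omega)]
        rw [ih hnd' 0 xs.length (by omega)]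
        simp [combs]
      | succ j =>
        rw [ih hnd' (j+1) k (by omega), ih hnd' j (k+1) (by omega)]
        rw [combs]
        simp [List.reverse_append, List.map_reverse]

-- deleting the smallest surviving index from a "kept characters" list
lemma eraseIdx_keep (l : List Char) : ∀ (k i0 : Nat) (c : List Nat),
    (∀ j ∈ c, i0 < j) → k ≤ i0 → i0 < k + l.length →
    (((l.zipIdx k).filter (fun p => p.2 ∉ c)).map Prod.fst).eraseIdx (i0 - k)
      = ((l.zipIdx k).filter (fun p => p.2 ∉ (i0 :: c))).map Prod.fst := by
  induction l with
  | nil => intro k i0 c _ hk hlt; simp at hlt; omega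
  | cons a l ih =>
    intro k i0 c hmem hk hlt
    simp only [List.zipIdx_cons, List.filter_cons]
    by_cases hki : k = i0
    · subst hki
      have hc : k ∉ c := fun h => absurd (hmem _ h) (by omega)
      rw [if_pos (by simpa using hc), if_neg (by simp)]
      simp only [List.map_cons, Nat.sub_self, List.eraseIdx_cons_zero]
      have hfc : List.filter (fun p => decide (p.2 ∉ (k :: c))) (l.zipIdx (k+1))
          = List.filter (fun p => decide (p.2 ∉ c)) (l.zipIdx (k+1)) := by
        apply List.filter_congr
        rintro ⟨x, i⟩ hp
        have hki2 := (List.mem_zipIdx hp).1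
        simp only [decide_eq_decide, List.mem_cons]
        constructor
        · intro h hic; exact h (Or.inr hic)
        · rintro h (rfl | hic)
          · omega
          · exact h hic
      rw [hfc]
    · have h0 : k ∉ c := fun h => absurd (hmem _ h) (by omega)
      rw [if_pos (by simpa using h0), if_pos (by simp; exact ⟨by omega, h0⟩)]
      simp only [List.map_cons]
      have hstep : i0 - k = (i0 - (k+1)) + 1 := by omega
      rw [hstep, List.eraseIdx_cons_succ]
      rw [ih (k+1) i0 c hmem (by omega) (by simp at hlt; omega)]

-- A's right-to-left deletions compute exactly the characters at the surviving positions
lemma foldr_erase_eq_keep (c : List Nat) (l : List Char)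
    (hch : c.Pairwise (· < ·)) (hbd : ∀ j ∈ c, j < l.length) :
    c.foldr (fun j t => t.eraseIdx j) l
      = (l.zipIdx.filter (fun p => p.2 ∉ c)).map Prod.fst := by
  induction c with
  | nil => simp
  | cons i0 c ih =>
    rcases List.pairwise_cons.mp hch with ⟨hlt, hch'⟩
    have hrec := ih hch' (fun j hj => hbd j (List.mem_cons_of_mem _ hj))
    simp only [List.foldr_cons, hrec]
    have := eraseIdx_keep l 0 i0 c hlt (Nat.zero_le _) (by simpa using hbd i0 (by simp))
    simpa using this

-- B's "join the kept characters" is the same "surviving positions" list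
lemma keep_eq_mapGet (l : List Char) (c : List Nat) :
    ((List.range l.length).filter (fun j => j ∉ c)).map (fun j => l.getD j ' ')
      = (l.zipIdx.filter (fun p => p.2 ∉ c)).map Prod.fst := by
  have hr : List.range l.length = l.zipIdx.map Prod.snd := by
    rw [List.zipIdx_map_snd, List.range_eq_range']
  rw [hr, List.filter_map, List.map_map]
  apply List.map_congr_left
  rintro ⟨x, i⟩ hp
  rcases List.mem_filter.mp hp with ⟨hmem, _⟩
  have h := List.mem_zipIdx hmem
  simp only [Function.comp, List.getD]
  have : i < l.length := by omega
  simp [List.getElem?_eq_getElem this]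
  rw [h.2.2]; simp

lemma toList_remove_ith_char (s : String) (j : Nat) :
    (remove_ith_char s (j : Int)).toList = s.toList.eraseIdx j := by
  rw [remove_ith_char, String.toList_append, PySem.Str.toList_slice, PySem.Str.toList_slice]
  rw [PySem.Chars.slice_eq_listSlice, PySem.Chars.slice_eq_listSlice]
  have : (j : Int) + 1 = ((j + 1 : Nat) : Int) := by push_cast; ring
  rw [this, PySem.List.slice_to_natCast, PySem.List.slice_from_natCast,
    List.eraseIdx_eq_take_drop_succ]

lemma toList_foldr_remove (c : List Nat) (s : String) :
    (c.foldr (fun (j : Nat) (t : String) => remove_ith_char t ((j : Int))) s).toList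
      = c.foldr (fun j t => t.eraseIdx j) s.toList := by
  induction c generalizing s with
  | nil => rfl
  | cons j c ih => simp only [List.foldr_cons, toList_remove_ith_char, ih]

-- A's countdown loop is a right fold over the combination
lemma inner_loop_eq_foldr (c : List Int) (s : String) :
    (PySem.List.pyRange ((c.length : Int) - 1) (-1) (-1)).foldl
      (fun typo i => remove_ith_char typo (PySem.List.pyGetD c i 0)) s
    = c.foldr (fun idx t => remove_ith_char t idx) s := by
  have h1 : PySem.List.pyRange ((c.length : Int) - 1) (-1) (-1)
      = (PySem.List.pyRange 0 (c.length : Int)).reverse := by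
    rw [PySem.List.pyRange_neg_one_eq_reverse]; norm_num
  rw [h1, List.foldl_reverse]
  conv_rhs => rw [← PySem.List.map_pyGetD_pyRange_zero' c 0]
  rw [List.foldr_map]

-- ===== VERDICT (by name: the statement is the Claim_ definition above) =====
theorem skip_letter_spec : Claim_equal_skip_letter := by
  intro s n hdom hpre
  unfold Spec_skip_letter skip_letter skip_letter_alt
  have hpre' : (0 : Int) ≤ n := hpre
  rw [if_neg (by omega)]
  have hlen : PySem.Str.len s = (s.toList.length : Int) := by simp [PySem.Str.len]
  simp only [hlen, PySem.List.pyRange_zero_natCast, combs_map]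
  by_cases hcase : (s.toList.length : Int) - n < 0
  · rw [if_pos hcase]
    rw [combs_nil_of_lt (show (List.range s.toList.length).length < n.toNat by simp only [List.length_range]; omega)]
    simp
  · rw [if_neg hcase]
    have hnL : n.toNat ≤ s.toList.length := by omega
    have hkeep : ((s.toList.length : Int) - n).toNat = s.toList.length - n.toNat := by omega
    rw [hkeep]
    rw [List.map_map, ← List.map_reverse, List.map_map,
      ← combs_compl_reverse (List.range s.toList.length) (List.nodup_range)
        (s.toList.length - n.toNat) n.toNat (by simp only [List.length_range]; omega),
      List.map_map]
    apply List.map_congr_left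
    intro c hc
    have hsub := combs_sublist hc
    have hpair : c.Pairwise (· < ·) := List.Pairwise.sublist hsub List.pairwise_lt_range
    have hbd : ∀ j ∈ c, j < s.toList.length := fun j hj => List.mem_range.mp (hsub.subset hj)
    dsimp only [Function.comp]
    rw [inner_loop_eq_foldr, List.foldr_map]
    apply String.toList_inj.mp
    rw [toList_foldr_remove, foldr_erase_eq_keep c s.toList hpair hbd, String.toList_ofList,
      List.map_map, ← keep_eq_mapGet]
    apply List.map_congr_left
    intro j hj
    simp [List.getD]
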